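-- pv_equiv track=rewrite | github.com/yangwohenmai/SomethingTemp | 量化调试项目/training/training/yinzi.py | cal_factor_days
-- ===== SOURCE A (Python) =====
-- def cal_factor_days(name,data_copy,series,num1,num2):
--     factor = []
--     for i in range(len(series)):
--         if i >= num1:
--             b = sum(series[i - num1+1:i + 1])
--             if b >= num2:
--                 l1 = 1
--             else:
--                 l1 = 0
--         else:
--             l1 = 0
--         factor.append(l1)
--
--     data_copy[name] = factor
--     return data_copy
-- ===== SOURCE B (Python) =====
-- def cal_factor_days(name, data_copy, series, num1, num2):
--     n = len(series)
--     if num1 < 1 or num1 >= n: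
--         factor = [0] * n
--     else:
--         factor = [0] * num1
--         win = sum(series[1:num1 + 1])
--         factor.append(1 if win >= num2 else 0)
--         for i in range(num1 + 1, n):
--             win += series[i] - series[i - num1]
--             factor.append(1 if win >= num2 else 0)
--     data_copy[name] = factor
--     return data_copy
-- ===== Notes on version B (the rewrite author's own statement) =====
-- stated objective: faster
-- what changed: B keeps a rolling window sum, adding the entering element and subtracting the leaving one per step, instead of re-summing the whole width-num1 slice at every index.
-- intended difference: For nonpositive window width (num1 <= 0) with num2 <= 0 and nonempty series, A flags every index with 1 because its slice is accidentally empty and 0 >= num2, while B returns 0 everywhere; no positive-width window exists there, so B's all-zero flags are the intended value. — e.g. on cal_factor_days("k", [], [0], 0, 0): A returns [("k", [1])], B returns [("k", [0])]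
import Mathlib
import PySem

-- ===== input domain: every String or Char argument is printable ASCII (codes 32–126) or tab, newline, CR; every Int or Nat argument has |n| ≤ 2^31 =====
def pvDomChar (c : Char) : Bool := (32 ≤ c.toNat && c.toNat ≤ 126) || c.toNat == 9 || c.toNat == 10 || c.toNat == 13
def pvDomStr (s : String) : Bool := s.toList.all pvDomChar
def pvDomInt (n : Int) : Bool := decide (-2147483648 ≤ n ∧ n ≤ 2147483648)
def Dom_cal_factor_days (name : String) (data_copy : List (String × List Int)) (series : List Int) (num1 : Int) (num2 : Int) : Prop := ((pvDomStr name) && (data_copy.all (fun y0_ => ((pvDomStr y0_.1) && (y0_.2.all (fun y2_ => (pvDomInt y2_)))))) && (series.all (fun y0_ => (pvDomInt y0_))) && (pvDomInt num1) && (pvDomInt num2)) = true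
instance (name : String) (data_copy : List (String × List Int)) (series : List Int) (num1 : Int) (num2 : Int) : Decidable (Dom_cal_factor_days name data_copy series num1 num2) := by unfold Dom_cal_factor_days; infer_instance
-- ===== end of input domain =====

-- B replaces the per-index slice re-sum with a rolling window sum (add entering, subtract leaving
-- element); A mutates data_copy in place in Python, B performs the same mutation; the equivalence
-- proved here is about the returned value.

-- ===== PORT A =====
def cal_factor_days (name : String) (data_copy : List (String × List Int)) (series : List Int) (num1 : Int) (num2 : Int) : List (String × List Int) :=
  let factor := (PySem.List.pyRange 0 (PySem.List.len series) 1).foldl (fun acc i =>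
    acc ++ [if i ≥ num1 then
              (if (PySem.List.slice series (some (i - num1 + 1)) (some (i + 1))).sum ≥ num2 then (1 : Int) else 0)
            else 0]) []
  (PySem.Dict.insert (PySem.Dict.mk data_copy) name factor).items

-- ===== PORT B =====
def cal_factor_days_alt (name : String) (data_copy : List (String × List Int)) (series : List Int) (num1 : Int) (num2 : Int) : List (String × List Int) :=
  let n := PySem.List.len series
  let factor :=
    if num1 < 1 ∨ num1 ≥ n then
      List.replicate n.toNat (0 : Int)
    else
      let win0 := (PySem.List.slice series (some 1) (some (num1 + 1))).sum
      let st := (PySem.List.pyRange (num1 + 1) n 1).foldl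
        (fun (st : List Int × Int) i =>
          let w := st.2 + PySem.List.pyGetD series i 0 - PySem.List.pyGetD series (i - num1) 0
          (st.1 ++ [if w ≥ num2 then (1 : Int) else 0], w))
        (List.replicate num1.toNat (0 : Int) ++ [if win0 ≥ num2 then (1 : Int) else 0], win0)
      st.1
  (PySem.Dict.insert (PySem.Dict.mk data_copy) name factor).items

-- ===== PRECONDITION & SPEC =====
-- For nonpositive window width (num1 ≤ 0) with num2 ≤ 0 and nonempty series, A flags every index
-- with 1 because its slice is accidentally empty and 0 ≥ num2, while B returns 0 everywhere; no
-- positive-width window exists there, so B's all-zero flags are the intended value.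
def D_cal_factor_days (name : String) (data_copy : List (String × List Int)) (series : List Int) (num1 : Int) (num2 : Int) : Prop :=
  num1 ≤ 0 ∧ num2 ≤ 0 ∧ series ≠ []
instance (name : String) (data_copy : List (String × List Int)) (series : List Int) (num1 : Int) (num2 : Int) : Decidable (D_cal_factor_days name data_copy series num1 num2) := by unfold D_cal_factor_days; infer_instance

def Spec_cal_factor_days (name : String) (data_copy : List (String × List Int)) (series : List Int) (num1 : Int) (num2 : Int) (out : List (String × List Int)) : Prop := ¬ D_cal_factor_days name data_copy series num1 num2 → out = cal_factor_days_alt name data_copy series num1 num2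
instance (name : String) (data_copy : List (String × List Int)) (series : List Int) (num1 : Int) (num2 : Int) (out : List (String × List Int)) : Decidable (Spec_cal_factor_days name data_copy series num1 num2 out) := by unfold Spec_cal_factor_days; infer_instance

def pvDiffWitness_cal_factor_days : String × (List (String × List Int)) × List Int × Int × Int := ("k", [], [0], 0, 0)
def pvDiffWitnessOut_cal_factor_days : (List (String × List Int)) × (List (String × List Int)) := ([("k", [1])], [("k", [0])])

-- ===== CLAIM (what is proved, stated in full; the proofs are below) =====
def Claim_unchanged_cal_factor_days : Prop := ∀ (name : String) (data_copy : List (String × List Int)) (series : List Int) (num1 : Int) (num2 : Int), Dom_cal_factor_days name data_copy series num1 num2 → Spec_cal_factor_days name data_copy series num1 num2 (cal_factor_days name data_copy series num1 num2)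
def Claim_changed_cal_factor_days : Prop := Dom_cal_factor_days (pvDiffWitness_cal_factor_days.1) (pvDiffWitness_cal_factor_days.2.1) (pvDiffWitness_cal_factor_days.2.2.1) (pvDiffWitness_cal_factor_days.2.2.2.1) (pvDiffWitness_cal_factor_days.2.2.2.2) ∧ D_cal_factor_days (pvDiffWitness_cal_factor_days.1) (pvDiffWitness_cal_factor_days.2.1) (pvDiffWitness_cal_factor_days.2.2.1) (pvDiffWitness_cal_factor_days.2.2.2.1) (pvDiffWitness_cal_factor_days.2.2.2.2) ∧ cal_factor_days (pvDiffWitness_cal_factor_days.1) (pvDiffWitness_cal_factor_days.2.1) (pvDiffWitness_cal_factor_days.2.2.1) (pvDiffWitness_cal_factor_days.2.2.2.1) (pvDiffWitness_cal_factor_days.2.2.2.2) = pvDiffWitnessOut_cal_factor_days.1 ∧ cal_factor_days_alt (pvDiffWitness_cal_factor_days.1) (pvDiffWitness_cal_factor_days.2.1) (pvDiffWitness_cal_factor_days.2.2.1) (pvDiffWitness_cal_factor_days.2.2.2.1) (pvDiffWitness_cal_factor_days.2.2.2.2) = pvDiffWitnessOut_cal_factor_days.2 ∧ pvDiffWitnessOut_cal_factor_days.1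 ≠ pvDiffWitnessOut_cal_factor_days.2
def Claim_exact_cal_factor_days : Prop := ∀ (name : String) (data_copy : List (String × List Int)) (series : List Int) (num1 : Int) (num2 : Int), Dom_cal_factor_days name data_copy series num1 num2 → D_cal_factor_days name data_copy series num1 num2 → cal_factor_days name data_copy series num1 num2 ≠ cal_factor_days_alt name data_copy series num1 num2

-- ===== LEMMAS AND PROOFS =====

-- the window sum A computes at index i
def pvW (series : List Int) (num1 i : Int) : Int :=
  (PySem.List.slice series (some (i - num1 + 1)) (some (i + 1))).sum

-- prefix sum
def pvP (series : List Int) (k : Nat) : Int := (series.take k).sum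

lemma sum_take_add (l : List Int) (j k : Nat) :
    (l.take (j + k)).sum = (l.take j).sum + ((l.drop j).take k).sum := by
  rw [List.take_add, List.sum_append]

-- slice sum as a difference of prefix sums
lemma slice_sum_eq (series : List Int) (a b : Int) (h0 : 0 ≤ a) (hab : a ≤ b) :
    (PySem.List.slice series (some a) (some b)).sum = pvP series b.toNat - pvP series a.toNat := by
  rw [PySem.List.slice_toNat series h0 (by omega)]
  have h := sum_take_add series a.toNat (b.toNat - a.toNat)
  rw [show a.toNat + (b.toNat - a.toNat) = b.toNat by omega] at h
  unfold pvP
  omega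

lemma pvP_succ (series : List Int) (k : Nat) (hk : k < series.length) :
    pvP series (k + 1) = pvP series k + series[k] := by
  unfold pvP
  rw [List.take_add_one, List.sum_append, List.getElem?_eq_getElem hk]
  simp

-- empty window: a nonpositive width gives the empty slice, hence sum 0
lemma pvW_empty (series : List Int) (num1 i : Int) (h1 : num1 ≤ 0) (h0 : 0 ≤ i) :
    pvW series num1 i = 0 := by
  unfold pvW
  rw [PySem.List.slice_toNat series (by omega) (by omega),
      show (i + 1).toNat - (i - num1 + 1).toNat = 0 by omega, List.take_zero]
  rfl

-- rolling update: moving the window right by one adds the entering and removes the leaving element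
lemma pvW_roll (series : List Int) (num1 j : Int) (h1 : 1 ≤ num1) (hj : num1 + 1 ≤ j)
    (hjn : j < (series.length : Int)) :
    pvW series num1 j
      = pvW series num1 (j - 1) + PySem.List.pyGetD series j 0 - PySem.List.pyGetD series (j - num1) 0 := by
  unfold pvW
  rw [slice_sum_eq series (j - num1 + 1) (j + 1) (by omega) (by omega),
      slice_sum_eq series (j - 1 - num1 + 1) (j - 1 + 1) (by omega) (by omega),
      PySem.List.pyGetD_eq_getElem series 0 (i := j) (by omega) hjn,
      PySem.List.pyGetD_eq_getElem series 0 (i := j - num1) (by omega) (by omega),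
      show (j + 1).toNat = j.toNat + 1 by omega,
      show (j - 1 + 1).toNat = j.toNat by omega,
      show (j - num1 + 1).toNat = (j - num1).toNat + 1 by omega,
      show (j - 1 - num1 + 1).toNat = (j - num1).toNat by omega,
      pvP_succ series j.toNat (by omega), pvP_succ series (j - num1).toNat (by omega)]
  ring

-- B's loop appends exactly A's flags, given the rolling-sum state invariant
lemma loop_spec (series : List Int) (num1 num2 : Int) (h1 : 1 ≤ num1) :
    ∀ (m : Nat) (j : Int), num1 + 1 ≤ j → j + m = max j (series.length : Int) →
    ∀ (acc : List Int),
      ((PySem.List.pyRange j (series.length : Int) 1).foldl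
        (fun (st : List Int × Int) i =>
          let w := st.2 + PySem.List.pyGetD series i 0 - PySem.List.pyGetD series (i - num1) 0
          (st.1 ++ [if w ≥ num2 then (1 : Int) else 0], w))
        (acc, pvW series num1 (j - 1))).1
      = acc ++ (PySem.List.pyRange j (series.length : Int) 1).map
          (fun i => if pvW series num1 i ≥ num2 then (1 : Int) else 0) := by
  intro m
  induction m with
  | zero =>
      intro j hj hm acc
      rw [PySem.List.pyRange_one_eq_nil (by omega)]
      simp
  | succ m ih =>
      intro j hj hm acc
      by_cases hjn : j < (series.length : Int)
      · rw [PySem.List.pyRange_one_cons hjn]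
        simp only [List.foldl_cons, List.map_cons]
        have hw : pvW series num1 (j - 1) + PySem.List.pyGetD series j 0
            - PySem.List.pyGetD series (j - num1) 0 = pvW series num1 j := by
          rw [pvW_roll series num1 j h1 hj hjn]
        have hj1 : pvW series num1 j = pvW series num1 (j + 1 - 1) := by norm_num
        rw [hw, hj1, ih (j + 1) (by omega) (by omega)
              (acc ++ [if pvW series num1 (j + 1 - 1) ≥ num2 then (1 : Int) else 0])]
        simp [hj1]
      · rw [PySem.List.pyRange_one_eq_nil (by omega)]
        simp

-- A's factor list as a map of flags over the index range
lemma factorA_eq (series : List Int) (num1 num2 : Int) :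
    (PySem.List.pyRange 0 (PySem.List.len series) 1).foldl (fun acc i =>
      acc ++ [if i ≥ num1 then
                (if (PySem.List.slice series (some (i - num1 + 1)) (some (i + 1))).sum ≥ num2 then (1 : Int) else 0)
              else 0]) []
    = (PySem.List.pyRange 0 (series.length : Int) 1).map
        (fun i => if i ≥ num1 then (if pvW series num1 i ≥ num2 then (1 : Int) else 0) else 0) := by
  rw [PySem.List.foldl_append_singleton_eq_map, List.nil_append, PySem.List.len_eq]
  rfl

-- an all-constant map over a range is a replicate
lemma map_const_range (a b : Int) (f : Int → Int) (c : Int)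
    (h : ∀ i, a ≤ i → i < b → f i = c) :
    (PySem.List.pyRange a b 1).map f = List.replicate (b - a).toNat c := by
  have h2 : (PySem.List.pyRange a b 1).map f = (PySem.List.pyRange a b 1).map (fun _ => c) :=
    List.map_congr_left (fun i hi => by
      rw [PySem.List.mem_pyRange_one] at hi; exact h i hi.1 hi.2)
  rw [h2, List.map_const', PySem.List.length_pyRange_one]

-- the two factor lists agree outside D_
lemma factor_eq (series : List Int) (num1 num2 : Int)
    (hD : ¬ (num1 ≤ 0 ∧ num2 ≤ 0 ∧ series ≠ [])) :
    (PySem.List.pyRange 0 (PySem.List.len series) 1).foldl (fun acc i =>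
      acc ++ [if i ≥ num1 then
                (if (PySem.List.slice series (some (i - num1 + 1)) (some (i + 1))).sum ≥ num2 then (1 : Int) else 0)
              else 0]) []
    = (if num1 < 1 ∨ num1 ≥ PySem.List.len series then
        List.replicate (PySem.List.len series).toNat (0 : Int)
      else
        ((PySem.List.pyRange (num1 + 1) (PySem.List.len series) 1).foldl
          (fun (st : List Int × Int) i =>
            let w := st.2 + PySem.List.pyGetD series i 0 - PySem.List.pyGetD series (i - num1) 0
            (st.1 ++ [if w ≥ num2 then (1 : Int) else 0], w))
          (List.replicate num1.toNat (0 : Int)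
             ++ [if (PySem.List.slice series (some 1) (some (num1 + 1))).sum ≥ num2 then (1 : Int) else 0],
           (PySem.List.slice series (some 1) (some (num1 + 1))).sum)).1) := by
  rw [factorA_eq, PySem.List.len_eq]
  by_cases hsmall : num1 < 1 ∨ num1 ≥ (series.length : Int)
  · rw [if_pos hsmall]
    rcases hsmall with hneg | hbig
    · -- num1 ≤ 0: outside D_ this forces num2 ≥ 1 or series = []; every slice is empty, flag 0
      by_cases hser : series = []
      · subst hser
        simp [PySem.List.pyRange_one_eq_nil]
      · have hnum2 : 1 ≤ num2 := by
          by_contra hc; exact hD ⟨by omega, by omega, hser⟩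
        rw [map_const_range 0 (series.length : Int) _ 0 (fun i h0 hi => by
          rw [if_pos (by omega), pvW_empty series num1 i (by omega) h0, if_neg (by omega)])]
        norm_num
    · -- num1 ≥ n: no index reaches the window width, flag 0 everywhere
      rw [map_const_range 0 (series.length : Int) _ 0 (fun i h0 hi => if_neg (by omega))]
      norm_num
  · rw [if_neg hsmall]
    push_neg at hsmall
    obtain ⟨h1, h2⟩ := hsmall
    have hwin0 : (PySem.List.slice series (some 1) (some (num1 + 1))).sum
        = pvW series num1 (num1 + 1 - 1) := by
      unfold pvW
      norm_num
    -- split the range at num1 and num1 + 1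
    rw [PySem.List.pyRange_one_append 0 num1 (series.length : Int) (by omega) (by omega),
        PySem.List.pyRange_one_append num1 (num1 + 1) (series.length : Int) (by omega) (by omega),
        PySem.List.pyRange_one_singleton, List.map_append, List.map_append, List.map_singleton]
    rw [map_const_range 0 num1 _ 0 (fun i h0 hi => if_neg (by omega)), Int.sub_zero]
    rw [hwin0, loop_spec series num1 num2 h1 ((series.length : Int) - (num1 + 1)).toNat (num1 + 1)
          (by omega) (by omega) _]
    rw [List.append_assoc]
    congr 1
    congr 1
    · rw [if_pos (by omega : num1 ≥ num1)]
      norm_num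
    · apply List.map_congr_left
      intro i hi
      rw [PySem.List.mem_pyRange_one] at hi
      rw [if_pos (by omega)]

-- inside D_ A flags every index
lemma factorA_D (series : List Int) (num1 num2 : Int) (h1 : num1 ≤ 0) (h2 : num2 ≤ 0) :
    (PySem.List.pyRange 0 (PySem.List.len series) 1).foldl (fun acc i =>
      acc ++ [if i ≥ num1 then
                (if (PySem.List.slice series (some (i - num1 + 1)) (some (i + 1))).sum ≥ num2 then (1 : Int) else 0)
              else 0]) []
    = List.replicate series.length (1 : Int) := by
  rw [factorA_eq,
      map_const_range 0 (series.length : Int) _ 1 (fun i h0 hi => by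
        rw [if_pos (by omega), pvW_empty series num1 i (by omega) h0, if_pos (by omega)])]
  norm_num

-- ===== VERDICT (by name: the statement is the Claim_ definition above) =====
theorem cal_factor_days_spec : Claim_unchanged_cal_factor_days := by
  intro name data_copy series num1 num2 _
  unfold Spec_cal_factor_days
  intro hD
  unfold D_cal_factor_days at hD
  simp only [cal_factor_days, cal_factor_days_alt]
  rw [factor_eq series num1 num2 hD]

theorem cal_factor_days_changed : Claim_changed_cal_factor_days := by
  unfold Claim_changed_cal_factor_days; decide

theorem cal_factor_days_tight : Claim_exact_cal_factor_days := by
  intro name data_copy series num1 num2 _ hD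
  unfold D_cal_factor_days at hD
  obtain ⟨h1, h2, h3⟩ := hD
  simp only [cal_factor_days, cal_factor_days_alt]
  intro hEq
  have hd := PySem.Dict.ext hEq
  have hv := congrArg (fun d => PySem.Dict.get? d name) hd
  simp only [PySem.Dict.get?_insert_self] at hv
  have hfac := Option.some.inj hv
  rw [factorA_D series num1 num2 h1 h2] at hfac
  rw [if_pos (Or.inl (by omega)), PySem.List.len_eq,
      show ((series.length : Int)).toNat = series.length by omega] at hfac
  have hlen : series.length ≠ 0 := by simpa using h3
  have h0 : (List.replicate series.length (1 : Int)).head? = some 1 := by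
    cases hn : series.length with
    | zero => omega
    | succ k => simp [List.replicate]
  rw [hfac] at h0
  cases hn : series.length with
  | zero => omega
  | succ k => rw [hn] at h0; simp [List.replicate] at h0
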